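-- pv_equiv track=rewrite | github.com/ISAIVC/isai-sourcing-pipeline | src/tasks/dealroom_enrichment.py | _normalize_domain
-- ===== SOURCE A (Python) =====
-- def _normalize_domain(url: str | None) -> str | None:
--     if not url:
--         return None
--     normalized = url.strip()
--     for prefix in ("https://www.", "http://www.", "https://", "http://"):
--         if normalized.startswith(prefix):
--             normalized = normalized[len(prefix) :]
--             break
--     return normalized.rstrip("/")
-- ===== SOURCE B (Python) =====
-- def _normalize_domain(url):
--     if not url:
--         return None
--     s = url.strip()
--     scheme, sep, rest = s.partition("://")
--     if sep and scheme in ("http", "https"):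
--         s = rest.removeprefix("www.")
--     return s.rstrip("/")
-- ===== Notes on version B (the rewrite author's own statement) =====
-- stated objective: idiomatic
-- what changed: Replaces A's ordered four-prefix startswith/slice loop by a single partition('://') locating the first scheme separator, a membership test of the scheme in ('http','https'), and removeprefix('www.') on the remainder.
import Mathlib
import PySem

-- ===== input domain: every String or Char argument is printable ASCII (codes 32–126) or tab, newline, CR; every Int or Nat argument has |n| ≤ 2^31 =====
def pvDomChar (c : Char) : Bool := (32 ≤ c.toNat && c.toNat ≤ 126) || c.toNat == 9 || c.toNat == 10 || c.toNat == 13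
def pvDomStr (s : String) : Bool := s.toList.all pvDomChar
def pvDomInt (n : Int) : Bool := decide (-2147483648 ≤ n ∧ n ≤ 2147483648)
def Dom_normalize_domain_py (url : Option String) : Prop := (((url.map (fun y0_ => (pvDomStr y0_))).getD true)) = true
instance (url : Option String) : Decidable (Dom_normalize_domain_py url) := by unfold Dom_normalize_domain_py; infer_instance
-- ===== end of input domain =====

-- B replaces A's ordered four-prefix startswith loop by one partition at "://" plus a removeprefix("www.") (idiomatic; same cost).


-- ===== PORT A =====
-- exact port of `s.rstrip("/")`: remove trailing '/' characters
def pvRstripSlash (cs : List Char) : List Char := (cs.reverse.dropWhile (fun c => c == '/')).reverse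

-- A's `for prefix in (...)`: test each prefix in order, strip the first match and break
def pvStripLoop (ps : List (List Char)) (n : List Char) : List Char :=
  match ps with
  | [] => n
  | p :: rest => if PySem.Chars.startswith n p then n.drop p.length else pvStripLoop rest n

def normalize_domain_py (url : Option String) : Option String :=
  match url with
  | none => none
  | some u =>
    if u = "" then none
    else
      let normalized := PySem.Chars.strip u.toList
      let normalized := pvStripLoop
        [['h','t','t','p','s',':','/','/','w','w','w','.'],
         ['h','t','t','p',':','/','/','w','w','w','.'],
         ['h','t','t','p','s',':','/','/'],
         ['h','t','t','p',':','/','/']] normalized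
      some (String.ofList (pvRstripSlash normalized))

-- ===== PORT B =====
-- s.partition(sep) for nonempty sep: split at the FIRST occurrence, else (s, "", "")
def pvPartition (s sep : List Char) : List Char × List Char × List Char :=
  let i := PySem.Chars.find s sep
  if i = -1 then (s, [], []) else (s.take i.toNat, sep, s.drop (i.toNat + sep.length))

-- str.removeprefix
def pvRemovePrefix (s p : List Char) : List Char :=
  if PySem.Chars.startswith s p then s.drop p.length else s

def normalize_domain_py_alt (url : Option String) : Option String :=
  match url with
  | none => none
  | some u =>
    if u = "" then none
    else
      let s := PySem.Chars.strip u.toList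
      let t := pvPartition s [':','/','/']
      let s := if t.2.1 ≠ [] ∧ (t.1 = ['h','t','t','p'] ∨ t.1 = ['h','t','t','p','s'])
               then pvRemovePrefix t.2.2 ['w','w','w','.'] else s
      some (String.ofList (pvRstripSlash s))

-- ===== PRECONDITION & SPEC =====
def Spec_normalize_domain_py (url : Option String) (out : Option String) : Prop := out = normalize_domain_py_alt url
instance (url : Option String) (out : Option String) : Decidable (Spec_normalize_domain_py url out) := by unfold Spec_normalize_domain_py; infer_instance

-- ===== CLAIM (what is proved, stated in full; the proofs are below) =====
def Claim_equal_normalize_domain_py : Prop := ∀ (url : Option String), Dom_normalize_domain_py url → Spec_normalize_domain_py url (normalize_domain_py url)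

-- ===== LEMMAS AND PROOFS =====
theorem pv_sw (n p : List Char) : PySem.Chars.startswith n p = decide (p <+: n) := by
  by_cases h : p <+: n
  · simpa [h] using (PySem.Chars.startswith_iff (s:=n) (p:=p)).mpr h
  · cases hb : PySem.Chars.startswith n p
    · simp [h]
    · exact absurd ((PySem.Chars.startswith_iff (s:=n) (p:=p)).mp hb) h

theorem pv_find_eq_of (s sub : List Char) (k : Nat) (hk : sub <+: s.drop k)
    (hmin : ∀ i, i < k → ¬ sub <+: s.drop i) : PySem.Chars.find s sub = (k : Int) := by
  have hin : PySem.Chars.isIn sub s = true := (PySem.Chars.exists_prefix_drop_iff_isIn sub s).mp ⟨k, hk⟩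
  have hnn : 0 ≤ PySem.Chars.find s sub := (PySem.Chars.find_nonneg_iff s sub).mpr ((PySem.Chars.isIn_iff_infix sub s).mp hin)
  obtain ⟨hpre, hlt⟩ := PySem.Chars.find_spec (s:=s) (sub:=sub) hnn
  have : (PySem.Chars.find s sub).toNat = k := by
    rcases lt_trichotomy (PySem.Chars.find s sub).toNat k with h | h | h
    · exact absurd hpre (hmin _ h)
    · exact h
    · exact absurd hk (hlt k h)
  omega

theorem pv_core_eq (cs : List Char) :
    pvStripLoop
        [['h','t','t','p','s',':','/','/','w','w','w','.'],
         ['h','t','t','p',':','/','/','w','w','w','.'],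
         ['h','t','t','p','s',':','/','/'],
         ['h','t','t','p',':','/','/']] cs
    = (let t := pvPartition cs [':','/','/']
       if t.2.1 ≠ [] ∧ (t.1 = ['h','t','t','p'] ∨ t.1 = ['h','t','t','p','s'])
       then pvRemovePrefix t.2.2 ['w','w','w','.'] else cs) := by
  by_cases h1 : ['h','t','t','p','s',':','/','/'] <+: cs
  · obtain ⟨r, rfl⟩ := h1
    have hf : PySem.Chars.find (['h','t','t','p','s',':','/','/'] ++ r) [':','/','/'] = (5 : Int) := by
      apply pv_find_eq_of
      · simp
      · intro i hi
        interval_cases i <;> simp [List.cons_prefix_cons]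
    simp only [List.cons_append, List.nil_append] at hf
    by_cases hw : ['w','w','w','.'] <+: r <;>
      simp [pvStripLoop, pvPartition, pvRemovePrefix, pv_sw, hf, hw, List.cons_prefix_cons]
  · by_cases h2 : ['h','t','t','p',':','/','/'] <+: cs
    · obtain ⟨r, rfl⟩ := h2
      have hf : PySem.Chars.find (['h','t','t','p',':','/','/'] ++ r) [':','/','/'] = (4 : Int) := by
        apply pv_find_eq_of
        · simp
        · intro i hi
          interval_cases i <;> simp [List.cons_prefix_cons]
      simp only [List.cons_append, List.nil_append] at hf
      by_cases hw : ['w','w','w','.'] <+: r <;>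
        simp [pvStripLoop, pvPartition, pvRemovePrefix, pv_sw, hf, hw, List.cons_prefix_cons]
    · have n1 : ¬ (['h','t','t','p','s',':','/','/','w','w','w','.'] <+: cs) := fun h =>
        h1 ((by decide : ['h','t','t','p','s',':','/','/'] <+: ['h','t','t','p','s',':','/','/','w','w','w','.']).trans h)
      have n2 : ¬ (['h','t','t','p',':','/','/','w','w','w','.'] <+: cs) := fun h =>
        h2 ((by decide : ['h','t','t','p',':','/','/'] <+: ['h','t','t','p',':','/','/','w','w','w','.']).trans h)
      by_cases hf0 : PySem.Chars.find cs [':','/','/'] = -1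
      · simp [pvStripLoop, pvPartition, pv_sw, n1, n2, h1, h2, hf0]
      · have hnn : 0 ≤ PySem.Chars.find cs [':','/','/'] := by
          have := PySem.Chars.neg_one_le_find cs [':','/','/']
          omega
        obtain ⟨hpre, hlt⟩ := PySem.Chars.find_spec (s:=cs) (sub:=[':','/','/']) hnn
        set f := (PySem.Chars.find cs [':','/','/']).toNat with hfdef
        have hlen : f + 3 ≤ cs.length := by
          have h3 := hpre.length_le
          simp at h3
          have hfl := PySem.Chars.find_le_length cs [':','/','/']
          omega
        have hcond : ¬ ((([':','/','/'] : List Char) ≠ [] ∧ (cs.take f = ['h','t','t','p'] ∨ cs.take f = ['h','t','t','p','s']))) := by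
          rintro ⟨-, ht | ht⟩
          · have hf4 : f = 4 := by
              have := congrArg List.length ht
              simp at this
              omega
            obtain ⟨rest, hrest⟩ := hpre
            apply h2
            refine ⟨rest, ?_⟩
            rw [hf4] at ht hrest
            have hsplit : (['h','t','t','p',':','/','/'] : List Char) ++ rest = cs.take 4 ++ cs.drop 4 := by
              rw [ht, ← hrest]; simp
            rw [hsplit, List.take_append_drop]
          · have hf5 : f = 5 := by
              have := congrArg List.length ht
              simp at this
              omega
            obtain ⟨rest, hrest⟩ := hpre
            apply h1
            refine ⟨rest, ?_⟩
            rw [hf5] at ht hrest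
            have hsplit : (['h','t','t','p','s',':','/','/'] : List Char) ++ rest = cs.take 5 ++ cs.drop 5 := by
              rw [ht, ← hrest]; simp
            rw [hsplit, List.take_append_drop]
        simp [pvStripLoop, pvPartition, pv_sw, n1, n2, h1, h2, hf0]
        intro h
        exact absurd ⟨by simp, h⟩ hcond

-- ===== VERDICT (by name: the statement is the Claim_ definition above) =====
theorem normalize_domain_py_spec : Claim_equal_normalize_domain_py := by
  intro url _
  unfold Spec_normalize_domain_py normalize_domain_py normalize_domain_py_alt
  cases url with
  | none => rfl
  | some u =>
    by_cases he : u = ""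
    · simp [he]
    · simp only [he, if_false]
      rw [pv_core_eq]
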